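-- pv_equiv track=rewrite | github.com/Mr-J-Forest/OceanRace | src/utils/dataset_utils.py | build_cumulative_ends
-- ===== SOURCE A (Python) =====
-- def build_cumulative_ends(lengths: list[int]) -> list[int]:
--     """将每个文件时间长度转换为累计结束索引（全局时间轴）。"""
--
--     out: list[int] = []
--     total = 0
--     for n in lengths:
--         if n < 0:
--             raise ValueError("time length must be >= 0")
--         total += n
--         out.append(total)
--     return out
-- ===== SOURCE B (Python) =====
-- def build_cumulative_ends(lengths: list[int]) -> list[int]:
--     if lengths and min(lengths) < 0:
--         raise ValueError("time length must be >= 0")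
--     out: list[int] = []
--     remaining = sum(lengths)
--     for n in reversed(lengths):
--         out.append(remaining)
--         remaining -= n
--     out.reverse()
--     return out
-- ===== Notes on version B (the rewrite author's own statement) =====
-- stated objective: alternative
-- what changed: Instead of A's forward loop accumulating a running total into out, B computes the grand total once (after a min-based validation) and builds the result back-to-front: it walks the reversed list emitting the remaining total and subtracting each element, then reverses the output.
import Mathlib
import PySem

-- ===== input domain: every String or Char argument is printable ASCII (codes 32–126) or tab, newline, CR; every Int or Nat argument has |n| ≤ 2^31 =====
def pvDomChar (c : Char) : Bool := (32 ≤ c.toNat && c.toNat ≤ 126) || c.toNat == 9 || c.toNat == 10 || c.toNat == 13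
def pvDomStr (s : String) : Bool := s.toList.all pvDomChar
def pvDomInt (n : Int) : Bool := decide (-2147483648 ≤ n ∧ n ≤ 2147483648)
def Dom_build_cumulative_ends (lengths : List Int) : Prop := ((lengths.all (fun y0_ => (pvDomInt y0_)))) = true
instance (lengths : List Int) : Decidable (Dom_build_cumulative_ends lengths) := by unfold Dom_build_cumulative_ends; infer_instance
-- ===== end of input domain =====

-- B replaces A's forward running-total loop with: validate via min, take the grand total,
-- then build the ends back-to-front by subtraction over the reversed list; equivalent wherever A returns.
-- ===== PORT A =====
-- A's single loop over (out, total); on n < 0 Python raises ValueError — those inputs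
-- are excluded by Pre_, the port returns the list built so far on that branch.
def buildA (total : Int) (out : List Int) : List Int → List Int
  | [] => out
  | n :: rest =>
      if n < 0 then out   -- raise ValueError (excluded by Pre_)
      else buildA (total + n) (out ++ [total + n]) rest

def build_cumulative_ends (lengths : List Int) : List Int :=
  buildA 0 [] lengths

-- ===== PORT B =====
-- backward pass of Source B: walk the reversed list, emit the remaining total, subtract each n
def revLoopB (remaining : Int) : List Int → List Int
  | [] => []
  | n :: rest => remaining :: revLoopB (remaining - n) rest

def build_cumulative_ends_alt (lengths : List Int) : List Int :=
  if (match PySem.List.min? lengths (fun x => x) with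
      | some m => decide (m < 0)
      | none => false) then []   -- raise ValueError (excluded by Pre_)
  else (revLoopB lengths.sum lengths.reverse).reverse

-- ===== PRECONDITION & SPEC =====
-- Python A raises ValueError as soon as it meets a negative length; Pre_ excludes such lists.
def Pre_build_cumulative_ends (lengths : List Int) : Prop := ∀ n ∈ lengths, 0 ≤ n
instance (lengths : List Int) : Decidable (Pre_build_cumulative_ends lengths) := by
  unfold Pre_build_cumulative_ends; infer_instance
def pvWitness_build_cumulative_ends : List Int := [3, 0, 5]

def Spec_build_cumulative_ends (lengths : List Int) (out : List Int) : Prop := out = build_cumulative_ends_alt lengths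
instance (lengths : List Int) (out : List Int) : Decidable (Spec_build_cumulative_ends lengths out) := by unfold Spec_build_cumulative_ends; infer_instance

-- ===== CLAIM (what is proved, stated in full; the proofs are below) =====
def Claim_equal_build_cumulative_ends : Prop := ∀ (lengths : List Int), Dom_build_cumulative_ends lengths → Pre_build_cumulative_ends lengths → Spec_build_cumulative_ends lengths (build_cumulative_ends lengths)

-- ===== LEMMAS AND PROOFS =====
-- the prefix-sum ("ends") list starting from a running total t — proof-only characterisation
def endsFrom (t : Int) : List Int → List Int
  | [] => []
  | n :: rest => (t + n) :: endsFrom (t + n) rest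

theorem revLoopB_append (xs ys : List Int) (r : Int) :
    revLoopB r (xs ++ ys) = revLoopB r xs ++ revLoopB (r - xs.sum) ys := by
  induction xs generalizing r with
  | nil => simp [revLoopB]
  | cons x t ih =>
      simp [revLoopB, ih, List.sum_cons]
      ring_nf

-- B's backward pass, reversed, is the forward prefix-sum list from r - l.sum
theorem revLoopB_reverse (l : List Int) :
    ∀ r : Int, (revLoopB r l.reverse).reverse = endsFrom (r - l.sum) l := by
  induction l with
  | nil => intro r; simp [revLoopB, endsFrom]
  | cons n rest ih =>
      intro r
      have h1 : (n :: rest).reverse = rest.reverse ++ [n] := by simp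
      rw [h1, revLoopB_append]
      simp only [revLoopB, List.reverse_append, List.reverse_cons, List.reverse_nil,
        List.nil_append, List.singleton_append, List.sum_reverse]
      rw [ih r]
      simp only [endsFrom, List.sum_cons, List.sum_reverse, List.cons.injEq]
      exact ⟨by ring, by rw [show r - (n + rest.sum) + n = r - rest.sum by ring]⟩

-- A's loop appends the prefix-sum list when no element is negative
theorem buildA_endsFrom (l : List Int) (h : ∀ n ∈ l, 0 ≤ n) :
    ∀ (total : Int) (out : List Int), buildA total out l = out ++ endsFrom total l := by
  induction l with
  | nil => intro total out; simp [buildA, endsFrom]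
  | cons n rest ih =>
      intro total out
      have hn : ¬ n < 0 := not_lt.2 (h n (List.mem_cons_self ..))
      have hrest : ∀ m ∈ rest, 0 ≤ m := fun m hm => h m (List.mem_cons_of_mem _ hm)
      simp [buildA, endsFrom, hn, ih hrest]

-- ===== VERDICT (by name: the statement is the Claim_ definition above) =====
theorem build_cumulative_ends_spec : Claim_equal_build_cumulative_ends := by
  intro lengths _ hpre
  unfold Spec_build_cumulative_ends build_cumulative_ends build_cumulative_ends_alt
  have hmin : (match PySem.List.min? lengths (fun x => x) with
      | some m => decide (m < 0)
      | none => false) = false := by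
    cases hm : PySem.List.min? lengths (fun x => x) with
    | none => rfl
    | some m =>
        simp only [decide_eq_false_iff_not, not_lt]
        exact hpre m (PySem.List.min?_mem hm)
  rw [hmin, if_neg (by simp), revLoopB_reverse, buildA_endsFrom lengths hpre]
  simp
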